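-- pv_equiv track=rewrite | github.com/polirritmico/codesignal_solutions | Python/The Core/rowsRearranging.py | solution
-- ===== SOURCE A (Python) =====
-- def solution(matrix: list[int]) -> bool:
--     columns_in_matrix = len(matrix[0])
--     first_column = [(row[0], idx) for idx, row in enumerate(matrix)]
--     sorted_matrix = []
--     for position in sorted(first_column):
--         row_idx_in_matrix = position[1]
--         sorted_matrix.append(matrix[row_idx_in_matrix])
--     sorted_cols = [[row[i] for row in sorted_matrix] for i in range(columns_in_matrix)]
--     for column in sorted_cols:
--         previous = column[0]
--         for number in column[1:]:
--             if number <= previous: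
--                 return False
--             previous = number
--     return True
-- ===== SOURCE B (Python) =====
-- def solution(matrix: list) -> bool:
--     # Sort-free pairwise check: a stable sort by row[0] yields strictly increasing
--     # columns iff every pair of rows has distinct first elements and the row with
--     # the smaller first element is strictly smaller in every column (transitivity).
--     width = len(matrix[0])
--     n = len(matrix)
--     for i in range(n):
--         for j in range(i + 1, n):
--             a, b = matrix[i], matrix[j]
--             if a[0] == b[0]:
--                 return False
--             lo, hi = (a, b) if a[0] < b[0] else (b, a)
--             for k in range(width):
--                 if lo[k] >= hi[k]:
--                     return False
--     return True
-- ===== Notes on version B (the rewrite author's own statement) =====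
-- stated objective: alternative
-- what changed: B drops A's sort-then-transpose-then-scan entirely: it checks every unordered pair of rows directly (distinct first elements, and the row with the smaller first element strictly smaller in every column), which by transitivity is equivalent to A's strictly-increasing-columns check after the stable sort by row[0].
import Mathlib
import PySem

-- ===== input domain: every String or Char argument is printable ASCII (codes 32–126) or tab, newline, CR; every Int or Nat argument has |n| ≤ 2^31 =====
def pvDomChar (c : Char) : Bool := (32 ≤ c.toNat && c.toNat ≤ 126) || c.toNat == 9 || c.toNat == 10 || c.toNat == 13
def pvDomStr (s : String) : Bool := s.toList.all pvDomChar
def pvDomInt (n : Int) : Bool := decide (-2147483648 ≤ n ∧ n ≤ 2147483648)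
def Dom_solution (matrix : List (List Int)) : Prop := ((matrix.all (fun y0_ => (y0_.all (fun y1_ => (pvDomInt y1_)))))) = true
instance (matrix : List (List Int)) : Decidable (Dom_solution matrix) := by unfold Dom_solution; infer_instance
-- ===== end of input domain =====

-- B replaces A's sort-transpose-scan with a sort-free pairwise check of all row pairs
-- (equivalent by stability of the sort and transitivity of strict dominance); objective: alternative.

-- ===== PORT A =====
-- inner check loop: 'previous = column[0]; for number in column[1:]: if number <= previous: return False'
def pvCheckCol (prev : Int) : List Int → Bool
  | [] => true
  | n :: ns => if n ≤ prev then false else pvCheckCol n ns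

-- outer loop over the columns, early False
def pvColsOK : List (List Int) → Bool
  | [] => true
  | c :: cs =>
      if pvCheckCol ((PySem.List.pyGet? c 0).getD 0) (PySem.List.slice c (some 1) none) then pvColsOK cs
      else false

def solution (matrix : List (List Int)) : Bool :=
  let columns_in_matrix := ((PySem.List.pyGet? matrix 0).getD []).length
  let first_column := (PySem.List.enumerate matrix 0).map (fun p => ((PySem.List.pyGet? p.2 0).getD 0, p.1))
  let sorted_matrix := (PySem.List.sorted2 first_column Prod.fst Prod.snd false).foldl
      (fun acc position => acc ++ [(PySem.List.pyGet? matrix position.2).getD []]) []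
  let sorted_cols := (PySem.List.pyRange 0 (columns_in_matrix : Int) 1).map
      (fun i => sorted_matrix.map (fun row => (PySem.List.pyGet? row i).getD 0))
  pvColsOK sorted_cols

-- ===== PORT B =====
def solution_alt (matrix : List (List Int)) : Bool :=
  let width := ((PySem.List.pyGet? matrix 0).getD []).length
  let n := (matrix.length : Int)
  (PySem.List.pyRange 0 n 1).all (fun i =>
    (PySem.List.pyRange (i + 1) n 1).all (fun j =>
      let a := (PySem.List.pyGet? matrix i).getD []
      let b := (PySem.List.pyGet? matrix j).getD []
      if (PySem.List.pyGet? a 0).getD 0 == (PySem.List.pyGet? b 0).getD 0 then false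
      else
        let lo := if (PySem.List.pyGet? a 0).getD 0 < (PySem.List.pyGet? b 0).getD 0 then a else b
        let hi := if (PySem.List.pyGet? a 0).getD 0 < (PySem.List.pyGet? b 0).getD 0 then b else a
        (PySem.List.pyRange 0 (width : Int) 1).all (fun k =>
          !decide ((PySem.List.pyGet? lo k).getD 0 ≥ (PySem.List.pyGet? hi k).getD 0))))

-- ===== PRECONDITION & SPEC =====
-- Pre_ excludes exactly the inputs where A raises (IndexError): the empty matrix, an empty row
-- (row[0]), or a row shorter than the first row (row[i] while building the transpose).
def Pre_solution (matrix : List (List Int)) : Prop :=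
  matrix ≠ [] ∧ ∀ row ∈ matrix, row ≠ [] ∧ (matrix.headD []).length ≤ row.length
instance (matrix : List (List Int)) : Decidable (Pre_solution matrix) := by unfold Pre_solution; infer_instance
def pvWitness_solution : List (List Int) := [[1, 2], [0, 1]]
def Spec_solution (matrix : List (List Int)) (out : Bool) : Prop := out = solution_alt matrix
instance (matrix : List (List Int)) (out : Bool) : Decidable (Spec_solution matrix out) := by unfold Spec_solution; infer_instance

-- ===== CLAIM (what is proved, stated in full; the proofs are below) =====
def Claim_equal_solution : Prop := ∀ (matrix : List (List Int)), Dom_solution matrix → Pre_solution matrix → Spec_solution matrix (solution matrix)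

-- ===== LEMMAS AND PROOFS =====

-- the sort key row[0] (total form; rows are nonempty under Pre_)
def pvK (r : List Int) : Int := (PySem.List.pyGet? r 0).getD 0
-- entry r[i] in total form
def pvG (r : List Int) (i : Int) : Int := (PySem.List.pyGet? r i).getD 0
-- strict dominance on the first w columns
def pvR (w : Int) (a b : List Int) : Prop := ∀ i ∈ PySem.List.pyRange 0 w 1, pvG a i < pvG b i
-- the symmetric pairwise condition B checks
def pvQ (w : Int) (a b : List Int) : Prop :=
  pvK a ≠ pvK b ∧ (if pvK a < pvK b then pvR w a b else pvR w b a)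
-- undecorate: a (value, index) pair back to its row of `matrix`
def pvF (matrix : List (List Int)) (q : Int × Int) : List Int := (PySem.List.pyGet? matrix q.2).getD []
-- lexicographic comparison on (Int × Int) pairs, as sorted2 uses it
def pvLtB (q q' : Int × Int) : Bool := decide (q.1 < q'.1) || (!decide (q'.1 < q.1) && decide (q.2 < q'.2))
-- comparison by key row[0]
def pvLtA (r r' : List Int) : Bool := decide (pvK r < pvK r')

theorem pvSorted2_eq (xs : List (Int × Int)) :
    PySem.List.sorted2 xs Prod.fst Prod.snd false
      = xs.foldl (fun acc x => PySem.List.insertBy pvLtB x acc) [] := rfl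

theorem pvSortedA_eq (xs : List (List Int)) :
    PySem.List.sorted xs pvK false
      = xs.foldl (fun acc x => PySem.List.insertBy pvLtA x acc) [] := rfl

theorem pvMapInsertBy {α β : Type} (f : α → β) (b : α → α → Bool) (b' : β → β → Bool) (x : α) :
    ∀ (ys : List α), (∀ y ∈ ys, b x y = b' (f x) (f y)) →
    (PySem.List.insertBy b x ys).map f = PySem.List.insertBy b' (f x) (ys.map f) := by
  intro ys
  induction ys with
  | nil => intro _; simp [PySem.List.insertBy]
  | cons y ys ih =>
    intro h
    have hy := h y (by simp)
    by_cases hb : b x y = true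
    · simp [PySem.List.insertBy, hb, ← hy]
    · have hb' : b' (f x) (f y) = false := by rw [← hy]; simpa using hb
      simp [PySem.List.insertBy, hb, hb', ih (fun z hz => h z (by simp [hz]))]

theorem pvSortAux (matrix : List (List Int)) :
    ∀ (t : List (List Int)) (s : Int) (acc : List (Int × Int)),
    (∀ q ∈ acc, q.2 < s ∧ q.1 = pvK (pvF matrix q)) →
    (∀ p ∈ PySem.List.enumerate t s, (PySem.List.pyGet? matrix p.1).getD [] = p.2) →
    ((PySem.List.enumerate t s).foldl (fun a p => PySem.List.insertBy pvLtB (pvK p.2, p.1) a) acc).map (pvF matrix)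
      = t.foldl (fun a r => PySem.List.insertBy pvLtA r a) (acc.map (pvF matrix)) := by
  intro t
  induction t with
  | nil => intro s acc _ _; simp [PySem.List.enumerate_nil]
  | cons x t ih =>
    intro s acc h1 h2
    rw [PySem.List.enumerate_cons]
    simp only [List.foldl_cons]
    have hx : (PySem.List.pyGet? matrix s).getD [] = x := by
      have := h2 (s, x) (by rw [PySem.List.enumerate_cons]; simp)
      simpa using this
    have hmap : (PySem.List.insertBy pvLtB (pvK x, s) acc).map (pvF matrix)
        = PySem.List.insertBy pvLtA x (acc.map (pvF matrix)) := by
      have := pvMapInsertBy (pvF matrix) pvLtB pvLtA (pvK x, s) acc (by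
        intro q hq
        obtain ⟨hq2, hq1⟩ := h1 q hq
        have hfx : pvF matrix (pvK x, s) = x := by simpa [pvF] using hx
        have hlt : decide (s < q.2) = false := by simp; omega
        simp [pvLtB, pvLtA, hfx, hq1, hlt])
      rw [this, show pvF matrix (pvK x, s) = x from by simpa [pvF] using hx]
    rw [ih (s + 1) _ ?_ ?_, hmap]
    · intro q hq
      rw [PySem.List.insertBy_mem_iff] at hq
      rcases hq with rfl | hq
      · refine ⟨by omega, ?_⟩
        simp only [pvF]
        rw [hx]
      · obtain ⟨hq2, hq1⟩ := h1 q hq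
        exact ⟨by omega, hq1⟩
    · intro p hp
      exact h2 p (by rw [PySem.List.enumerate_cons]; simp [hp])

theorem pvSortEq (matrix : List (List Int)) :
    ((PySem.List.sorted2 ((PySem.List.enumerate matrix 0).map (fun p => ((PySem.List.pyGet? p.2 0).getD 0, p.1)))
        Prod.fst Prod.snd false).map (pvF matrix))
      = PySem.List.sorted matrix pvK false := by
  rw [pvSorted2_eq, List.foldl_map, pvSortedA_eq]
  have h2 : ∀ p ∈ PySem.List.enumerate matrix 0, (PySem.List.pyGet? matrix p.1).getD [] = p.2 := by
    intro p hp
    rw [PySem.List.mem_enumerate_iff] at hp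
    obtain ⟨k, hk', rfl⟩ := hp
    simp [hk']
  have := pvSortAux matrix matrix 0 [] (by simp) h2
  simpa [pvK] using this

theorem pvColsOK_all (cs : List (List Int)) :
    pvColsOK cs = true ↔
      ∀ c ∈ cs, pvCheckCol ((PySem.List.pyGet? c 0).getD 0) (PySem.List.slice c (some 1) none) = true := by
  induction cs with
  | nil => simp [pvColsOK]
  | cons c cs ih =>
    by_cases h : pvCheckCol ((PySem.List.pyGet? c 0).getD 0) (PySem.List.slice c (some 1) none) = true
    · simp [pvColsOK, h, ih]
    · simp [pvColsOK, h]

theorem pvCheckCol_iff (l : List Int) :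
    ∀ (a : Int), pvCheckCol a l = true ↔
      ∀ k (h : k + 1 < (a :: l).length), (a :: l)[k] < (a :: l)[k + 1] := by
  induction l with
  | nil =>
    intro a
    simp only [pvCheckCol, List.length]
    constructor
    · intro _ k hk; omega
    · intro _; trivial
  | cons n ns ih =>
    intro a
    by_cases hna : n ≤ a
    · simp only [pvCheckCol, if_pos hna]
      constructor
      · intro h; cases h
      · intro h
        have h0 := h 0 (by simp)
        simp at h0
        omega
    · simp only [pvCheckCol, if_neg hna]
      rw [ih n]
      constructor
      · intro h k hk
        match k with
        | 0 => simp; omega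
        | k + 1 =>
          have hk' : k + 1 < (n :: ns).length := by simp at hk ⊢; omega
          have := h k hk'
          simpa using this
      · intro h k hk
        have hk' : (k + 1) + 1 < (a :: n :: ns).length := by simp at hk ⊢; omega
        have := h (k + 1) hk'
        simpa using this

theorem pvColGet (i : Int) (r : List Int) (t : List (List Int)) (k : Nat) (hk : k < (r :: t).length) :
    ((PySem.List.pyGet? r i).getD 0 :: t.map (fun row => (PySem.List.pyGet? row i).getD 0))[k]'(by simpa using hk)
      = (PySem.List.pyGet? ((r :: t)[k]) i).getD 0 := by
  cases k with
  | zero => rfl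
  | succ k => simp

theorem pvColsSide (S : List (List Int)) (hS : S ≠ []) (w : Int) :
    pvColsOK ((PySem.List.pyRange 0 w 1).map (fun i => S.map (fun row => (PySem.List.pyGet? row i).getD 0))) = true
      ↔ ∀ i ∈ PySem.List.pyRange 0 w 1, ∀ k (_ : k + 1 < S.length),
          (PySem.List.pyGet? S[k] i).getD 0 < (PySem.List.pyGet? S[k + 1] i).getD 0 := by
  obtain ⟨r, t, rfl⟩ := List.exists_cons_of_ne_nil hS
  rw [pvColsOK_all]
  constructor
  · intro h i hi k hk
    have hc := h _ (List.mem_map_of_mem hi)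
    rw [List.map_cons] at hc
    rw [PySem.List.slice_from _ (by norm_num)] at hc
    simp only [Int.toNat_one, List.drop_one, List.tail_cons] at hc
    have h0 : ((PySem.List.pyGet? ((PySem.List.pyGet? r i).getD 0 :: t.map (fun row => (PySem.List.pyGet? row i).getD 0)) 0).getD 0) = (PySem.List.pyGet? r i).getD 0 := by
      have := PySem.List.pyGet?_natCast ((PySem.List.pyGet? r i).getD 0 :: t.map (fun row => (PySem.List.pyGet? row i).getD 0)) 0
      simpa using this
    rw [h0] at hc
    rw [pvCheckCol_iff] at hc
    have hk1 : k < (r :: t).length := by simp at hk ⊢; omega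
    have hk2 : k + 1 < (r :: t).length := by simp at hk ⊢; omega
    have hthis := hc k (by simpa using hk2)
    rw [pvColGet i r t k hk1, pvColGet i r t (k + 1) hk2] at hthis
    exact hthis
  · intro h c hc
    rw [List.mem_map] at hc
    obtain ⟨i, hi, rfl⟩ := hc
    rw [List.map_cons, PySem.List.slice_from _ (by norm_num)]
    simp only [Int.toNat_one, List.drop_one, List.tail_cons]
    have h0 : ((PySem.List.pyGet? ((PySem.List.pyGet? r i).getD 0 :: t.map (fun row => (PySem.List.pyGet? row i).getD 0)) 0).getD 0) = (PySem.List.pyGet? r i).getD 0 := by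
      have := PySem.List.pyGet?_natCast ((PySem.List.pyGet? r i).getD 0 :: t.map (fun row => (PySem.List.pyGet? row i).getD 0)) 0
      simpa using this
    rw [h0, pvCheckCol_iff]
    intro k hk
    have hk1 : k < (r :: t).length := by simp at hk ⊢; omega
    have hk2 : k + 1 < (r :: t).length := by simp at hk ⊢; omega
    rw [pvColGet i r t k hk1, pvColGet i r t (k + 1) hk2]
    exact h i hi k hk2

-- pvR is transitive; pvQ is symmetric
theorem pvR_trans (w : Int) (a b c : List Int) (h1 : pvR w a b) (h2 : pvR w b c) : pvR w a c := by
  intro i hi; exact lt_trans (h1 i hi) (h2 i hi)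

theorem pvQ_symm (w : Int) {a b : List Int} (h : pvQ w a b) : pvQ w b a := by
  obtain ⟨hne, hr⟩ := h
  refine ⟨hne.symm, ?_⟩
  by_cases hlt : pvK a < pvK b
  · rw [if_pos hlt] at hr
    rw [if_neg (by omega)]
    exact hr
  · rw [if_neg hlt] at hr
    rw [if_pos (by rcases lt_or_ge (pvK b) (pvK a) with h' | h'; exact h'; omega)]
    exact hr

-- A's result is the pairwise dominance condition on the sorted list
theorem pvA_iff (matrix : List (List Int)) (hne : matrix ≠ []) :
    solution matrix = true ↔
      (PySem.List.sorted matrix pvK false).Pairwise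
        (pvR (((PySem.List.pyGet? matrix 0).getD []).length : Int)) := by
  simp only [solution]
  rw [show ((PySem.List.sorted2 ((PySem.List.enumerate matrix 0).map (fun p => ((PySem.List.pyGet? p.2 0).getD 0, p.1)))
        Prod.fst Prod.snd false).foldl (fun acc position => acc ++ [(PySem.List.pyGet? matrix position.2).getD []]) [])
      = ((PySem.List.sorted2 ((PySem.List.enumerate matrix 0).map (fun p => ((PySem.List.pyGet? p.2 0).getD 0, p.1)))
        Prod.fst Prod.snd false).map (pvF matrix)) from by
    have h := PySem.List.foldl_append_singleton_eq_map (pvF matrix)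
      (PySem.List.sorted2 ((PySem.List.enumerate matrix 0).map (fun p => ((PySem.List.pyGet? p.2 0).getD 0, p.1)))
        Prod.fst Prod.snd false) []
    simpa [pvF] using h]
  rw [pvSortEq]
  set S := PySem.List.sorted matrix pvK false with hSdef
  have hS : S ≠ [] := by
    rw [hSdef, Ne, PySem.List.sorted_eq_nil_iff]
    exact hne
  rw [pvColsSide S hS]
  have htr : ∀ {a b c : List Int},
      pvR (((PySem.List.pyGet? matrix 0).getD []).length : Int) a b →
      pvR (((PySem.List.pyGet? matrix 0).getD []).length : Int) b c →
      pvR (((PySem.List.pyGet? matrix 0).getD []).length : Int) a c :=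
    fun h1 h2 => pvR_trans _ _ _ _ h1 h2
  haveI : Trans (pvR (((PySem.List.pyGet? matrix 0).getD []).length : Int))
      (pvR (((PySem.List.pyGet? matrix 0).getD []).length : Int))
      (pvR (((PySem.List.pyGet? matrix 0).getD []).length : Int)) := ⟨htr⟩
  rw [← List.isChain_iff_pairwise, List.isChain_iff_getElem]
  constructor
  · intro h k hk
    intro i hi
    exact h i hi k hk
  · intro h i hi k hk
    exact h k hk i hi

-- B's result is the pairwise symmetric condition on the matrix itself
theorem pvB_iff (matrix : List (List Int)) :
    solution_alt matrix = true ↔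
      matrix.Pairwise (pvQ (((PySem.List.pyGet? matrix 0).getD []).length : Int)) := by
  simp only [solution_alt, List.all_eq_true]
  rw [List.pairwise_iff_getElem]
  constructor
  · intro h p q hp hq hpq
    have hip : (p : Int) ∈ PySem.List.pyRange 0 (matrix.length : Int) 1 := by
      rw [PySem.List.mem_pyRange_one]; omega
    have hjq : (q : Int) ∈ PySem.List.pyRange ((p : Int) + 1) (matrix.length : Int) 1 := by
      rw [PySem.List.mem_pyRange_one]; omega
    have := h (p : Int) hip (q : Int) hjq
    simp only at this
    rw [show (PySem.List.pyGet? matrix (p : Int)).getD [] = matrix[p] from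
          PySem.List.pyGetD_eq_getElem matrix [] (by omega) (by omega),
        show (PySem.List.pyGet? matrix (q : Int)).getD [] = matrix[q] from
          PySem.List.pyGetD_eq_getElem matrix [] (by omega) (by omega)] at this
    by_cases heq : pvK matrix[p] = pvK matrix[q]
    · exfalso
      rw [if_pos (by simpa [pvK] using heq)] at this
      exact Bool.false_ne_true this
    · refine ⟨heq, ?_⟩
      rw [if_neg (by simpa [pvK] using heq)] at this
      rw [List.all_eq_true] at this
      by_cases hlt : pvK matrix[p] < pvK matrix[q]
      · rw [if_pos hlt]
        rw [if_pos (by simpa [pvK] using hlt), if_pos (by simpa [pvK] using hlt)] at this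
        intro i hi
        have := this i hi
        simp only [Bool.not_eq_eq_eq_not, Bool.not_true, decide_eq_false_iff_not, not_le, ge_iff_le] at this
        exact this
      · rw [if_neg hlt]
        rw [if_neg (by simpa [pvK] using hlt), if_neg (by simpa [pvK] using hlt)] at this
        intro i hi
        have := this i hi
        simp only [Bool.not_eq_eq_eq_not, Bool.not_true, decide_eq_false_iff_not, not_le, ge_iff_le] at this
        exact this
  · intro h i hi j hj
    rw [PySem.List.mem_pyRange_one] at hi hj
    have hpq : i.toNat < j.toNat := by omega
    have hjlen : j.toNat < matrix.length := by omega
    have hq := h i.toNat j.toNat (by omega) hjlen hpq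
    rw [show (PySem.List.pyGet? matrix i).getD [] = matrix[i.toNat] from by
          rw [← PySem.List.pyGetD_eq_getElem matrix [] (by omega) (by omega)]; rfl,
        show (PySem.List.pyGet? matrix j).getD [] = matrix[j.toNat] from by
          rw [← PySem.List.pyGetD_eq_getElem matrix [] (by omega) (by omega)]; rfl]
    obtain ⟨hne, hr⟩ := hq
    rw [if_neg (by simpa [pvK] using hne)]
    by_cases hlt : pvK matrix[i.toNat] < pvK matrix[j.toNat]
    · rw [if_pos hlt] at hr
      rw [if_pos (by simpa [pvK] using hlt), if_pos (by simpa [pvK] using hlt)]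
      rw [List.all_eq_true]
      intro k hk
      have := hr k hk
      simp only [Bool.not_eq_eq_eq_not, Bool.not_true, decide_eq_false_iff_not, not_le, ge_iff_le]
      exact this
    · rw [if_neg hlt] at hr
      rw [if_neg (by simpa [pvK] using hlt), if_neg (by simpa [pvK] using hlt)]
      rw [List.all_eq_true]
      intro k hk
      have := hr k hk
      simp only [Bool.not_eq_eq_eq_not, Bool.not_true, decide_eq_false_iff_not, not_le, ge_iff_le]
      exact this

-- on the sorted list, pairwise dominance and the symmetric condition coincide (width ≥ 1)
theorem pvRQ_iff (matrix : List (List Int)) (w : Int) (hw : 0 < w) :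
    (PySem.List.sorted matrix pvK false).Pairwise (pvR w)
      ↔ (PySem.List.sorted matrix pvK false).Pairwise (pvQ w) := by
  have hsorted : (PySem.List.sorted matrix pvK false).Pairwise (fun a b => pvK a ≤ pvK b) :=
    PySem.List.sorted_pairwise matrix pvK
  constructor
  · intro h
    refine h.imp ?_
    intro a b hr
    have h0 : pvG a 0 < pvG b 0 := hr 0 (by rw [PySem.List.mem_pyRange_one]; omega)
    have hk : pvK a < pvK b := h0
    exact ⟨ne_of_lt hk, by rw [if_pos hk]; exact hr⟩
  · intro h
    refine (hsorted.and h).imp ?_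
    rintro a b ⟨hle, hne, hr⟩
    have hk : pvK a < pvK b := lt_of_le_of_ne hle hne
    rw [if_pos hk] at hr
    exact hr

theorem solution_eq (matrix : List (List Int)) (hpre : Pre_solution matrix) :
    solution matrix = solution_alt matrix := by
  obtain ⟨hne, hrows⟩ := hpre
  have hw : 0 < (((PySem.List.pyGet? matrix 0).getD []).length : Int) := by
    obtain ⟨r, t, rfl⟩ := List.exists_cons_of_ne_nil hne
    have hr := (hrows r (by simp)).1
    have : (PySem.List.pyGet? (r :: t) (0 : Int)).getD [] = r := by
      have := PySem.List.pyGet?_natCast (r :: t) 0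
      simpa using this
    rw [this]
    cases r with
    | nil => exact absurd rfl hr
    | cons x xs => simp
  rw [Bool.eq_iff_iff, pvA_iff matrix hne, pvB_iff matrix,
      pvRQ_iff matrix _ hw]
  exact List.Perm.pairwise_iff
    (R := pvQ (((PySem.List.pyGet? matrix 0).getD []).length : Int))
    (fun h => pvQ_symm _ h) (PySem.List.sorted_perm matrix pvK false)

-- ===== VERDICT (by name: the statement is the Claim_ definition above) =====
theorem solution_spec : Claim_equal_solution := by
  intro matrix _ hpre
  unfold Spec_solution
  exact solution_eq matrix hpre
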